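-- pv_equiv track=rewrite | github.com/Mikeyad1/aws-cloud-waste-tracker | src/cwt_ui/components/setup_aws_content.py | _group_regions_by_area
-- ===== SOURCE A (Python) =====
-- def _group_regions_by_area(regions: list[str]) -> dict[str, list[str]]:
--     groups: dict[str, list[str]] = {"USA": [], "Europe": [], "Asia Pacific": [], "Middle East": [], "Africa": [], "South America": [], "Canada": [], "Other": []}
--     for region in regions:
--         if any(region.startswith(p) for p in ["us-"]): groups["USA"].append(region)
--         elif any(region.startswith(p) for p in ["eu-"]): groups["Europe"].append(region)
--         elif any(region.startswith(p) for p in ["ap-", "ap-south"]): groups["Asia Pacific"].append(region)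
--         elif any(region.startswith(p) for p in ["me-"]): groups["Middle East"].append(region)
--         elif any(region.startswith(p) for p in ["af-"]): groups["Africa"].append(region)
--         elif any(region.startswith(p) for p in ["sa-"]): groups["South America"].append(region)
--         elif any(region.startswith(p) for p in ["ca-"]): groups["Canada"].append(region)
--         else: groups["Other"].append(region)
--     return {k: sorted(v) for k, v in groups.items() if v}
-- ===== SOURCE B (Python) =====
-- _PREFIX_AREA = {"us-": "USA", "eu-": "Europe", "ap-": "Asia Pacific", "me-": "Middle East",
--                 "af-": "Africa", "sa-": "South America", "ca-": "Canada"}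
-- _AREA_ORDER = ["USA", "Europe", "Asia Pacific", "Middle East", "Africa", "South America", "Canada", "Other"]
--
--
-- def _group_regions_by_area(regions: list[str]) -> dict[str, list[str]]:
--     out: dict[str, list[str]] = {}
--     for area in _AREA_ORDER:
--         members = sorted(r for r in regions if _PREFIX_AREA.get(r[:3], "Other") == area)
--         if members:
--             out[area] = members
--     return out
-- ===== Notes on version B (the rewrite author's own statement) =====
-- stated objective: simpler
-- what changed: Replaces the region-major loop with a seven-branch any(startswith) if/elif chain and a mutated seed dict by an area-major pass: for each canonical area name, filter the regions via a static 3-char-prefix lookup table, sort, and keep non-empty groups.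
import Mathlib
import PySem

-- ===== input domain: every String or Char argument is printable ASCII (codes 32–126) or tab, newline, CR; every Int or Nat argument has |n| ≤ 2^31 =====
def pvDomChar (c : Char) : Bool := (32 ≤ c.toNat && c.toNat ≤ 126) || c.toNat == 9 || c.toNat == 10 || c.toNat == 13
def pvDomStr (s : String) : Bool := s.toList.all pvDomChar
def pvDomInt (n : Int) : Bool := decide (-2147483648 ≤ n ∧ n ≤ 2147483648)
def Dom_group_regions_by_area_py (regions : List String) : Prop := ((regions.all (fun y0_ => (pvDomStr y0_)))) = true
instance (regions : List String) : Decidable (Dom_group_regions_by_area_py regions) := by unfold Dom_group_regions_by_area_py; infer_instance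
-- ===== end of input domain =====

-- B replaces A's region-major loop with a seven-branch startswith chain by an area-major pass:
-- for each canonical area name it filters the regions via a 3-char-prefix lookup table (objective: simpler).

-- ===== PORT A =====
-- literal port of _group_regions_by_area: dict seeded with the 8 areas, per-region if/elif chain of
-- any(startswith), then the comprehension {k: sorted(v) for k, v in groups.items() if v} — since the
-- keys of `groups` are distinct, that dict comprehension is the filter + map over its items list.
def group_regions_by_area_py (regions : List String) : List (String × List String) :=
  let groups0 : PySem.Dict String (List String) :=
    PySem.Dict.ofList [("USA", []), ("Europe", []), ("Asia Pacific", []), ("Middle East", []),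
      ("Africa", []), ("South America", []), ("Canada", []), ("Other", [])]
  let groups := regions.foldl (fun g region =>
    if ["us-"].any (fun p => PySem.Str.startswith region p) then g.modify "USA" [] (· ++ [region])
    else if ["eu-"].any (fun p => PySem.Str.startswith region p) then g.modify "Europe" [] (· ++ [region])
    else if ["ap-", "ap-south"].any (fun p => PySem.Str.startswith region p) then g.modify "Asia Pacific" [] (· ++ [region])
    else if ["me-"].any (fun p => PySem.Str.startswith region p) then g.modify "Middle East" [] (· ++ [region])
    else if ["af-"].any (fun p => PySem.Str.startswith region p) then g.modify "Africa" [] (· ++ [region])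
    else if ["sa-"].any (fun p => PySem.Str.startswith region p) then g.modify "South America" [] (· ++ [region])
    else if ["ca-"].any (fun p => PySem.Str.startswith region p) then g.modify "Canada" [] (· ++ [region])
    else g.modify "Other" [] (· ++ [region])) groups0
  (groups.items.filter (fun kv => kv.2 ≠ [])).map (fun kv => (kv.1, PySem.List.sorted kv.2 (fun x => x) false))

-- ===== PORT B =====
-- _PREFIX_AREA (dict literal, distinct keys)
def pvPrefixArea : PySem.Dict String String :=
  PySem.Dict.ofList [("us-", "USA"), ("eu-", "Europe"), ("ap-", "Asia Pacific"), ("me-", "Middle East"),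
    ("af-", "Africa"), ("sa-", "South America"), ("ca-", "Canada")]
-- _AREA_ORDER
def pvAreaOrder : List String :=
  ["USA", "Europe", "Asia Pacific", "Middle East", "Africa", "South America", "Canada", "Other"]
-- literal port of Source B: `out` is a dict that only ever receives fresh keys, so as an association list
-- each `out[area] = members` is an append.
def group_regions_by_area_py_alt (regions : List String) : List (String × List String) :=
  pvAreaOrder.foldl (fun out area =>
    let members := PySem.List.sorted
      (regions.filter (fun r => pvPrefixArea.getD (PySem.Str.slice r (some 0) (some 3)) "Other" == area))
      (fun x => x) false
    if members ≠ [] then out ++ [(area, members)] else out) []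

-- ===== PRECONDITION & SPEC =====
def Spec_group_regions_by_area_py (regions : List String) (out : List (String × List String)) : Prop := out = group_regions_by_area_py_alt regions
instance (regions : List String) (out : List (String × List String)) : Decidable (Spec_group_regions_by_area_py regions out) := by unfold Spec_group_regions_by_area_py; infer_instance

-- ===== CLAIM (what is proved, stated in full; the proofs are below) =====
def Claim_equal_group_regions_by_area_py : Prop := ∀ (regions : List String), Dom_group_regions_by_area_py regions → Spec_group_regions_by_area_py regions (group_regions_by_area_py regions)

-- ===== LEMMAS AND PROOFS =====

-- the classification A's if/elif chain computes for one region
def pvAreaOf (r : String) : String :=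
  if PySem.Str.startswith r "us-" then "USA"
  else if PySem.Str.startswith r "eu-" then "Europe"
  else if (PySem.Str.startswith r "ap-" || PySem.Str.startswith r "ap-south") then "Asia Pacific"
  else if PySem.Str.startswith r "me-" then "Middle East"
  else if PySem.Str.startswith r "af-" then "Africa"
  else if PySem.Str.startswith r "sa-" then "South America"
  else if PySem.Str.startswith r "ca-" then "Canada"
  else "Other"

-- startswith with a 3-character needle is equality of the first-3-characters slice
lemma pv_sw3 (r p : String) (hp : p.toList.length = 3) :
    PySem.Str.startswith r p = (PySem.Str.slice r (some 0) (some 3) == p) := by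
  have hs : (PySem.Str.slice r (some 0) (some 3)).toList = List.take 3 r.toList := by
    rw [PySem.Str.toList_slice, PySem.Chars.slice_eq_listSlice, PySem.List.slice_zero_start,
      PySem.List.slice_to _ (by norm_num : (0:Int) ≤ 3)]
    simp
  rw [Bool.eq_iff_iff, PySem.Str.startswith_eq, PySem.Chars.startswith_iff,
    List.prefix_iff_eq_take, hp, beq_iff_eq]
  constructor
  · intro h
    apply String.toList_inj.mp
    rw [hs]
    exact h.symm
  · intro h
    have h2 := congrArg String.toList h
    rw [hs] at h2
    exact h2.symm

-- the "ap-south" alternative in A's chain is subsumed by "ap-"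
lemma pv_ap_south (r : String) :
    (PySem.Str.startswith r "ap-" || PySem.Str.startswith r "ap-south") = PySem.Str.startswith r "ap-" := by
  cases h : PySem.Str.startswith r "ap-south" with
  | false => simp
  | true =>
    have h2 : ("ap-south".toList) <+: r.toList := by
      rw [PySem.Str.startswith_eq] at h; exact (PySem.Chars.startswith_iff _ _).mp h
    have h3 : PySem.Chars.startswith r.toList ['a', 'p', '-'] = true :=
      (PySem.Chars.startswith_iff _ _).mpr (List.IsPrefix.trans (by decide) h2)
    simp [h3]

lemma pvPrefixArea_mk : pvPrefixArea = PySem.Dict.mk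
    [("us-", "USA"), ("eu-", "Europe"), ("ap-", "Asia Pacific"), ("me-", "Middle East"),
     ("af-", "Africa"), ("sa-", "South America"), ("ca-", "Canada")] := by decide

-- B's table lookup computes exactly A's chain classification
lemma pv_areaB_eq (r : String) :
    pvPrefixArea.getD (PySem.Str.slice r (some 0) (some 3)) "Other" = pvAreaOf r := by
  rw [pvAreaOf, pv_ap_south,
    pv_sw3 r "us-" (by decide), pv_sw3 r "eu-" (by decide), pv_sw3 r "ap-" (by decide),
    pv_sw3 r "me-" (by decide), pv_sw3 r "af-" (by decide), pv_sw3 r "sa-" (by decide),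
    pv_sw3 r "ca-" (by decide)]
  rw [pvPrefixArea_mk]
  simp only [PySem.Dict.getD_eq_get?_getD, PySem.Dict.get?_mk_cons, beq_iff_eq]
  by_cases h1 : PySem.Str.slice r (some 0) (some 3) = "us-"
  · simp [h1]
  simp only [if_neg h1, if_neg (Ne.symm h1)]
  by_cases h2 : PySem.Str.slice r (some 0) (some 3) = "eu-"
  · simp [h2]
  simp only [if_neg h2, if_neg (Ne.symm h2)]
  by_cases h3 : PySem.Str.slice r (some 0) (some 3) = "ap-"
  · simp [h3]
  simp only [if_neg h3, if_neg (Ne.symm h3)]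
  by_cases h4 : PySem.Str.slice r (some 0) (some 3) = "me-"
  · simp [h4]
  simp only [if_neg h4, if_neg (Ne.symm h4)]
  by_cases h5 : PySem.Str.slice r (some 0) (some 3) = "af-"
  · simp [h5]
  simp only [if_neg h5, if_neg (Ne.symm h5)]
  by_cases h6 : PySem.Str.slice r (some 0) (some 3) = "sa-"
  · simp [h6]
  simp only [if_neg h6, if_neg (Ne.symm h6)]
  by_cases h7 : PySem.Str.slice r (some 0) (some 3) = "ca-"
  · simp [h7]
  simp only [if_neg h7, if_neg (Ne.symm h7)]
  simp [PySem.Dict.get?]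

-- proof-side name for A's 8-slot accumulator dict
def mkD (l1 l2 l3 l4 l5 l6 l7 l8 : List String) : PySem.Dict String (List String) :=
  PySem.Dict.mk [("USA", l1), ("Europe", l2), ("Asia Pacific", l3), ("Middle East", l4),
    ("Africa", l5), ("South America", l6), ("Canada", l7), ("Other", l8)]

lemma pv_consIf (x n : String) (rest : List String) :
    (if pvAreaOf x = n then [x] else []) ++ rest = if pvAreaOf x == n then x :: rest else rest := by
  by_cases h : pvAreaOf x = n <;> simp [h]

-- one iteration of A's loop: modify on the 8-slot literal dict, one lemma per branch (all definitional)
lemma pv_mod1 (r : String) (l1 l2 l3 l4 l5 l6 l7 l8 : List String) : (mkD l1 l2 l3 l4 l5 l6 l7 l8).modify "USA" [] (· ++ [r]) = mkD (l1 ++ [r]) l2 l3 l4 l5 l6 l7 l8 := rfl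
lemma pv_mod2 (r : String) (l1 l2 l3 l4 l5 l6 l7 l8 : List String) : (mkD l1 l2 l3 l4 l5 l6 l7 l8).modify "Europe" [] (· ++ [r]) = mkD l1 (l2 ++ [r]) l3 l4 l5 l6 l7 l8 := rfl
lemma pv_mod3 (r : String) (l1 l2 l3 l4 l5 l6 l7 l8 : List String) : (mkD l1 l2 l3 l4 l5 l6 l7 l8).modify "Asia Pacific" [] (· ++ [r]) = mkD l1 l2 (l3 ++ [r]) l4 l5 l6 l7 l8 := rfl
lemma pv_mod4 (r : String) (l1 l2 l3 l4 l5 l6 l7 l8 : List String) : (mkD l1 l2 l3 l4 l5 l6 l7 l8).modify "Middle East" [] (· ++ [r]) = mkD l1 l2 l3 (l4 ++ [r]) l5 l6 l7 l8 := rfl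
lemma pv_mod5 (r : String) (l1 l2 l3 l4 l5 l6 l7 l8 : List String) : (mkD l1 l2 l3 l4 l5 l6 l7 l8).modify "Africa" [] (· ++ [r]) = mkD l1 l2 l3 l4 (l5 ++ [r]) l6 l7 l8 := rfl
lemma pv_mod6 (r : String) (l1 l2 l3 l4 l5 l6 l7 l8 : List String) : (mkD l1 l2 l3 l4 l5 l6 l7 l8).modify "South America" [] (· ++ [r]) = mkD l1 l2 l3 l4 l5 (l6 ++ [r]) l7 l8 := rfl
lemma pv_mod7 (r : String) (l1 l2 l3 l4 l5 l6 l7 l8 : List String) : (mkD l1 l2 l3 l4 l5 l6 l7 l8).modify "Canada" [] (· ++ [r]) = mkD l1 l2 l3 l4 l5 l6 (l7 ++ [r]) l8 := rfl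
lemma pv_mod8 (r : String) (l1 l2 l3 l4 l5 l6 l7 l8 : List String) : (mkD l1 l2 l3 l4 l5 l6 l7 l8).modify "Other" [] (· ++ [r]) = mkD l1 l2 l3 l4 l5 l6 l7 (l8 ++ [r]) := rfl

-- one iteration of A's loop on the accumulator
set_option maxHeartbeats 1000000 in
lemma pv_stepA (r l1 l2 l3 l4 l5 l6 l7 l8) :
    (if ["us-"].any (fun p => PySem.Str.startswith r p) then (mkD l1 l2 l3 l4 l5 l6 l7 l8).modify "USA" [] (· ++ [r])
     else if ["eu-"].any (fun p => PySem.Str.startswith r p) then (mkD l1 l2 l3 l4 l5 l6 l7 l8).modify "Europe" [] (· ++ [r])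
     else if ["ap-", "ap-south"].any (fun p => PySem.Str.startswith r p) then (mkD l1 l2 l3 l4 l5 l6 l7 l8).modify "Asia Pacific" [] (· ++ [r])
     else if ["me-"].any (fun p => PySem.Str.startswith r p) then (mkD l1 l2 l3 l4 l5 l6 l7 l8).modify "Middle East" [] (· ++ [r])
     else if ["af-"].any (fun p => PySem.Str.startswith r p) then (mkD l1 l2 l3 l4 l5 l6 l7 l8).modify "Africa" [] (· ++ [r])
     else if ["sa-"].any (fun p => PySem.Str.startswith r p) then (mkD l1 l2 l3 l4 l5 l6 l7 l8).modify "South America" [] (· ++ [r])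
     else if ["ca-"].any (fun p => PySem.Str.startswith r p) then (mkD l1 l2 l3 l4 l5 l6 l7 l8).modify "Canada" [] (· ++ [r])
     else (mkD l1 l2 l3 l4 l5 l6 l7 l8).modify "Other" [] (· ++ [r]))
    = mkD (l1 ++ if pvAreaOf r = "USA" then [r] else []) (l2 ++ if pvAreaOf r = "Europe" then [r] else [])
        (l3 ++ if pvAreaOf r = "Asia Pacific" then [r] else []) (l4 ++ if pvAreaOf r = "Middle East" then [r] else [])
        (l5 ++ if pvAreaOf r = "Africa" then [r] else []) (l6 ++ if pvAreaOf r = "South America" then [r] else [])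
        (l7 ++ if pvAreaOf r = "Canada" then [r] else []) (l8 ++ if pvAreaOf r = "Other" then [r] else []) := by
  simp only [List.any_cons, List.any_nil, Bool.or_false, pvAreaOf]
  by_cases h1 : PySem.Str.startswith r "us-" = true
  · simp at h1; simp [h1, pv_mod1]
  simp at h1
  by_cases h2 : PySem.Str.startswith r "eu-" = true
  · simp at h2; simp [h1, h2, pv_mod2]
  simp at h2
  by_cases h3 : (PySem.Str.startswith r "ap-" || PySem.Str.startswith r "ap-south") = true
  · simp at h3; simp [h1, h2, h3, pv_mod3]
  simp at h3
  by_cases h4 : PySem.Str.startswith r "me-" = true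
  · simp at h4; simp [h1, h2, h3, h4, pv_mod4]
  simp at h4
  by_cases h5 : PySem.Str.startswith r "af-" = true
  · simp at h5; simp [h1, h2, h3, h4, h5, pv_mod5]
  simp at h5
  by_cases h6 : PySem.Str.startswith r "sa-" = true
  · simp at h6; simp [h1, h2, h3, h4, h5, h6, pv_mod6]
  simp at h6
  by_cases h7 : PySem.Str.startswith r "ca-" = true
  · simp at h7; simp [h1, h2, h3, h4, h5, h6, h7, pv_mod7]
  simp at h7
  simp [h1, h2, h3, h4, h5, h6, h7, pv_mod8]

-- A's whole loop: each slot collects the regions its branch classifies, in order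
lemma pv_loopA (regions : List String) (l1 l2 l3 l4 l5 l6 l7 l8 : List String) :
    List.foldl (fun g region =>
      if ["us-"].any (fun p => PySem.Str.startswith region p) then g.modify "USA" [] (· ++ [region])
      else if ["eu-"].any (fun p => PySem.Str.startswith region p) then g.modify "Europe" [] (· ++ [region])
      else if ["ap-", "ap-south"].any (fun p => PySem.Str.startswith region p) then g.modify "Asia Pacific" [] (· ++ [region])
      else if ["me-"].any (fun p => PySem.Str.startswith region p) then g.modify "Middle East" [] (· ++ [region])
      else if ["af-"].any (fun p => PySem.Str.startswith region p) then g.modify "Africa" [] (· ++ [region])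
      else if ["sa-"].any (fun p => PySem.Str.startswith region p) then g.modify "South America" [] (· ++ [region])
      else if ["ca-"].any (fun p => PySem.Str.startswith region p) then g.modify "Canada" [] (· ++ [region])
      else g.modify "Other" [] (· ++ [region])) (mkD l1 l2 l3 l4 l5 l6 l7 l8) regions
    = mkD (l1 ++ regions.filter (fun r => pvAreaOf r == "USA")) (l2 ++ regions.filter (fun r => pvAreaOf r == "Europe"))
        (l3 ++ regions.filter (fun r => pvAreaOf r == "Asia Pacific")) (l4 ++ regions.filter (fun r => pvAreaOf r == "Middle East"))
        (l5 ++ regions.filter (fun r => pvAreaOf r == "Africa")) (l6 ++ regions.filter (fun r => pvAreaOf r == "South America"))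
        (l7 ++ regions.filter (fun r => pvAreaOf r == "Canada")) (l8 ++ regions.filter (fun r => pvAreaOf r == "Other")) := by
  induction regions generalizing l1 l2 l3 l4 l5 l6 l7 l8 with
  | nil => simp
  | cons r rs ih =>
    rw [List.foldl_cons, pv_stepA, ih]
    simp only [mkD, List.filter_cons, List.append_assoc, pv_consIf]

-- A's seed dict is the 8-slot literal dict with empty slots
lemma pv_dict0 : (PySem.Dict.ofList [("USA", ([] : List String)), ("Europe", []), ("Asia Pacific", []),
    ("Middle East", []), ("Africa", []), ("South America", []), ("Canada", []), ("Other", [])])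
    = mkD [] [] [] [] [] [] [] [] := by rfl

-- B's loop over the area list, with the lookup already rewritten to A's classification
lemma pv_B_build (regions : List String) (areas : List String) (acc : List (String × List String)) :
    areas.foldl (fun out area =>
      let members := PySem.List.sorted
        (regions.filter (fun r => pvAreaOf r == area)) (fun x => x) false
      if members ≠ [] then out ++ [(area, members)] else out) acc
    = acc ++ (areas.filter (fun a => decide (regions.filter (fun r => pvAreaOf r == a) ≠ []))).map
        (fun a => (a, PySem.List.sorted (regions.filter (fun r => pvAreaOf r == a)) (fun x => x) false)) := by
  induction areas generalizing acc with
  | nil => simp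
  | cons a as ih =>
    rw [List.foldl_cons]
    by_cases h : regions.filter (fun r => pvAreaOf r == a) = []
    · have hne : ¬ ∃ x ∈ regions, pvAreaOf x = a := by
        simpa using List.filter_eq_nil_iff.mp h
      rw [ih]
      simp [h, hne, PySem.List.sorted_eq_nil_iff]
    · have he : ∃ x ∈ regions, pvAreaOf x = a := by simpa using h
      have hs : PySem.List.sorted (regions.filter (fun r => pvAreaOf r == a)) (fun x => x) false ≠ [] := by
        simpa [PySem.List.sorted_eq_nil_iff] using h
      rw [ih]
      simp [hs, he, List.append_assoc]

theorem group_regions_by_area_py_spec_aux (regions : List String) :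
    group_regions_by_area_py regions = group_regions_by_area_py_alt regions := by
  rw [group_regions_by_area_py, group_regions_by_area_py_alt]
  simp only [pv_areaB_eq]
  rw [pv_dict0, pv_loopA, pv_B_build]
  have hitems : (mkD (([] : List String) ++ regions.filter (fun r => pvAreaOf r == "USA"))
      ([] ++ regions.filter (fun r => pvAreaOf r == "Europe")) ([] ++ regions.filter (fun r => pvAreaOf r == "Asia Pacific"))
      ([] ++ regions.filter (fun r => pvAreaOf r == "Middle East")) ([] ++ regions.filter (fun r => pvAreaOf r == "Africa"))
      ([] ++ regions.filter (fun r => pvAreaOf r == "South America")) ([] ++ regions.filter (fun r => pvAreaOf r == "Canada"))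
      ([] ++ regions.filter (fun r => pvAreaOf r == "Other"))).items
      = pvAreaOrder.map (fun a => (a, regions.filter (fun r => pvAreaOf r == a))) := by
    simp [mkD, pvAreaOrder]
  rw [hitems, List.filter_map, List.map_map]
  simp [Function.comp_def]
  congr 1
  refine List.filter_congr ?_
  intro a _
  simp only [← decide_not, decide_eq_decide]
  first
  | tauto
  | simp [not_forall]

-- ===== VERDICT (by name: the statement is the Claim_ definition above) =====
theorem group_regions_by_area_py_spec : Claim_equal_group_regions_by_area_py := by
  intro regions _
  unfold Spec_group_regions_by_area_py
  exact group_regions_by_area_py_spec_aux regions
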